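-- pv_equiv track=rewrite | github.com/jcprimo/python-training | hanoi/hanoi_ascii.py | print_floor
-- ===== SOURCE A (Python) =====
-- def print_floor(max_size):
-- 	res_floor = []
--
-- 	# Why 3 and 2?
-- 	for i in range((2*max_size+1) * 3 + 2):
-- 		if i == max_size:
-- 			res_floor.append("A")
--
-- 		elif i ==(2*max_size+1)+1+max_size:
-- 			res_floor.append("B")
--
-- 		elif i == (2*max_size+1)*2+2+max_size:
-- 			res_floor.append("C")
--
-- 		else:
-- 			res_floor.append("=")
-- 	return res_floor
-- ===== SOURCE B (Python) =====
-- def print_floor(max_size):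
--     if max_size < 0:
--         return []
--     pad = ["="] * max_size
--     return (pad + ["A"] + pad) + ["="] + (pad + ["B"] + pad) + ["="] + (pad + ["C"] + pad)
-- ===== Notes on version B (the rewrite author's own statement) =====
-- stated objective: simpler
-- what changed: B assembles the row from its structural parts (three peg segments of equals-sign padding around each letter, joined by single separators) instead of scanning every index and testing it against three position formulas; a negativity guard reproduces the empty-range case.
import Mathlib
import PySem

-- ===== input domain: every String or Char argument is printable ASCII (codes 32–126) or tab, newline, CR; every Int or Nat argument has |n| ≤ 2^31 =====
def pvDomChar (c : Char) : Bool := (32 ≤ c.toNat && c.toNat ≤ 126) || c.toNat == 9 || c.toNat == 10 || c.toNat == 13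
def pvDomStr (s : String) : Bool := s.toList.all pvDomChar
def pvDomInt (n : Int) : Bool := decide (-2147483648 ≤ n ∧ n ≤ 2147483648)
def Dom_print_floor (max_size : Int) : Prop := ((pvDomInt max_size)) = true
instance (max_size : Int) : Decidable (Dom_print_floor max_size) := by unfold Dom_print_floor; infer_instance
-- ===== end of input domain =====

-- B builds the row from its three peg segments directly instead of scanning indices; objective: simpler.

-- ===== PORT A =====
def print_floor (max_size : Int) : List String :=
  (PySem.List.pyRange 0 ((2*max_size+1) * 3 + 2) 1).foldl
    (fun res_floor i =>
      if i = max_size then res_floor ++ ["A"]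
      else if i = (2*max_size+1)+1+max_size then res_floor ++ ["B"]
      else if i = (2*max_size+1)*2+2+max_size then res_floor ++ ["C"]
      else res_floor ++ ["="]) []

-- ===== PORT B =====
def print_floor_alt (max_size : Int) : List String :=
  if max_size < 0 then []
  else
    let pad := List.replicate max_size.toNat "="
    (pad ++ ["A"] ++ pad) ++ ["="] ++ (pad ++ ["B"] ++ pad) ++ ["="] ++ (pad ++ ["C"] ++ pad)

-- ===== PRECONDITION & SPEC =====
def Spec_print_floor (max_size : Int) (out : List String) : Prop := out = print_floor_alt max_size
instance (max_size : Int) (out : List String) : Decidable (Spec_print_floor max_size out) := by unfold Spec_print_floor; infer_instance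

-- ===== CLAIM (what is proved, stated in full; the proofs are below) =====
def Claim_equal_print_floor : Prop := ∀ (max_size : Int), Dom_print_floor max_size → Spec_print_floor max_size (print_floor max_size)

-- ===== LEMMAS AND PROOFS =====

-- the append-one foldl of A is a map over the range
theorem pv_foldl_map {α β : Type} (f : α → β) :
    ∀ (l : List α) (init : List β),
      l.foldl (fun res i => res ++ [f i]) init = init ++ l.map f := by
  intro l
  induction l with
  | nil => simp
  | cons x xs ih => intro init; simp [List.foldl, ih]

-- a range on which the step function is constantly "=" maps to a replicate
theorem pv_map_const_eq (a b : Int) (f : Int → String)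
    (h : ∀ x, a ≤ x → x < b → f x = "=") :
    (PySem.List.pyRange a b 1).map f = List.replicate (b - a).toNat "=" := by
  have h1 : (PySem.List.pyRange a b 1).map f
      = (PySem.List.pyRange a b 1).map (fun _ => "=") := by
    apply List.map_congr_left
    intro x hx
    rw [PySem.List.mem_pyRange_one] at hx
    exact h x hx.1 hx.2
  rw [h1, List.map_const', PySem.List.length_pyRange_one]

theorem print_floor_eq_alt (max_size : Int) :
    print_floor max_size = print_floor_alt max_size := by
  by_cases hneg : max_size < 0
  · have hb : (2*max_size+1) * 3 + 2 ≤ 0 := by omega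
    simp [print_floor, print_floor_alt, hneg,
      PySem.List.pyRange_one_eq_nil (by omega : (2*max_size+1) * 3 + 2 ≤ (0:Int))]
  · push_neg at hneg
    obtain ⟨n, rfl⟩ : ∃ n : Nat, max_size = (n : Int) := ⟨max_size.toNat, by omega⟩
    set m : Int := (n : Int) with hm
    set f : Int → String := fun i =>
      if i = m then "A"
      else if i = (2*m+1)+1+m then "B"
      else if i = (2*m+1)*2+2+m then "C"
      else "=" with hf
    have hfold : print_floor m = (PySem.List.pyRange 0 ((2*m+1)*3+2) 1).map f := by
      unfold print_floor
      have hbody : (fun (res_floor : List String) (i : Int) =>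
          if i = m then res_floor ++ ["A"]
          else if i = (2*m+1)+1+m then res_floor ++ ["B"]
          else if i = (2*m+1)*2+2+m then res_floor ++ ["C"]
          else res_floor ++ ["="])
          = fun res i => res ++ [f i] := by
        funext res i
        simp only [hf]
        split_ifs <;> rfl
      rw [hbody, pv_foldl_map f]
      simp
    -- split the range at the letter positions
    have hsplit : PySem.List.pyRange 0 ((2*m+1)*3+2) 1
        = PySem.List.pyRange 0 m 1
          ++ PySem.List.pyRange m (m+1) 1
          ++ PySem.List.pyRange (m+1) (3*m+2) 1
          ++ PySem.List.pyRange (3*m+2) (3*m+3) 1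
          ++ PySem.List.pyRange (3*m+3) (5*m+4) 1
          ++ PySem.List.pyRange (5*m+4) (5*m+5) 1
          ++ PySem.List.pyRange (5*m+5) ((2*m+1)*3+2) 1 := by
      rw [PySem.List.pyRange_one_append 0 m ((2*m+1)*3+2) (by omega) (by omega),
          PySem.List.pyRange_one_append m (m+1) ((2*m+1)*3+2) (by omega) (by omega),
          PySem.List.pyRange_one_append (m+1) (3*m+2) ((2*m+1)*3+2) (by omega) (by omega),
          PySem.List.pyRange_one_append (3*m+2) (3*m+3) ((2*m+1)*3+2) (by omega) (by omega),
          PySem.List.pyRange_one_append (3*m+3) (5*m+4) ((2*m+1)*3+2) (by omega) (by omega),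
          PySem.List.pyRange_one_append (5*m+4) (5*m+5) ((2*m+1)*3+2) (by omega) (by omega)]
      simp [List.append_assoc]
    have hA : (PySem.List.pyRange m (m+1) 1).map f = ["A"] := by
      rw [PySem.List.pyRange_one_singleton]
      simp [hf]
    have hB : (PySem.List.pyRange (3*m+2) (3*m+3) 1).map f = ["B"] := by
      have : PySem.List.pyRange (3*m+2) (3*m+2+1) 1 = [3*m+2] :=
        PySem.List.pyRange_one_singleton (3*m+2)
      rw [show (3*m+3) = 3*m+2+1 by ring, this]
      simp only [List.map_cons, List.map_nil, hf]
      rw [if_neg (by omega : ¬ (3*m+2 = m)), if_pos (by ring : 3*m+2 = (2*m+1)+1+m)]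
    have hC : (PySem.List.pyRange (5*m+4) (5*m+5) 1).map f = ["C"] := by
      have : PySem.List.pyRange (5*m+4) (5*m+4+1) 1 = [5*m+4] :=
        PySem.List.pyRange_one_singleton (5*m+4)
      rw [show (5*m+5) = 5*m+4+1 by ring, this]
      simp only [List.map_cons, List.map_nil, hf]
      rw [if_neg (by omega : ¬ (5*m+4 = m)), if_neg (by omega : ¬ (5*m+4 = (2*m+1)+1+m)),
          if_pos (by ring : 5*m+4 = (2*m+1)*2+2+m)]
    have hE1 : (PySem.List.pyRange 0 m 1).map f = List.replicate n "=" := by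
      rw [pv_map_const_eq 0 m f (by intro x h1 h2; simp only [hf]; split_ifs <;> first | rfl | (exfalso; omega))]
      congr 1 <;> omega
    have hE2 : (PySem.List.pyRange (m+1) (3*m+2) 1).map f = List.replicate (2*n+1) "=" := by
      rw [pv_map_const_eq (m+1) (3*m+2) f (by intro x h1 h2; simp only [hf]; split_ifs <;> first | rfl | (exfalso; omega))]
      congr 1 <;> omega
    have hE3 : (PySem.List.pyRange (3*m+3) (5*m+4) 1).map f = List.replicate (2*n+1) "=" := by
      rw [pv_map_const_eq (3*m+3) (5*m+4) f (by intro x h1 h2; simp only [hf]; split_ifs <;> first | rfl | (exfalso; omega))]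
      congr 1 <;> omega
    have hE4 : (PySem.List.pyRange (5*m+5) ((2*m+1)*3+2) 1).map f = List.replicate n "=" := by
      rw [pv_map_const_eq (5*m+5) ((2*m+1)*3+2) f
        (by intro x h1 h2; simp only [hf]; split_ifs <;> first | rfl | (exfalso; omega))]
      congr 1 <;> omega
    have hmid : List.replicate (2*n+1) "=" =
        List.replicate n "=" ++ ["="] ++ List.replicate n "=" := by
      rw [show 2*n+1 = n + (1 + n) by omega, List.replicate_add, List.replicate_add]
      simp
    rw [hfold, hsplit]
    simp only [List.map_append, hA, hB, hC, hE1, hE2, hE3, hE4]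
    have hnn : ¬ (m < 0) := by omega
    have htn : m.toNat = n := by omega
    simp only [print_floor_alt, if_neg hnn, htn, hmid]
    simp [List.append_assoc]

-- ===== VERDICT (by name: the statement is the Claim_ definition above) =====
theorem print_floor_spec : Claim_equal_print_floor := by
  intro max_size _
  exact print_floor_eq_alt max_size
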